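-- pv_equiv track=rewrite | github.com/grapheneaffiliate/h4-polytopic-attention | solve_arc.py | solve_10fcaaa3
-- ===== SOURCE A (Python) =====
-- def solve_10fcaaa3(grid):
--     h, w = len(grid), len(grid[0])
--     oh, ow = h * 2, w * 2
--     tiled = [[grid[r % h][c % w] for c in range(ow)] for r in range(oh)]
--     out = [row[:] for row in tiled]
--     for r in range(oh):
--         for c in range(ow):
--             if tiled[r][c] == 0:
--                 for dr, dc in [(-1,-1),(-1,1),(1,-1),(1,1)]:
--                     nr, nc = r + dr, c + dc
--                     if 0 <= nr < oh and 0 <= nc < ow and tiled[nr][nc] != 0: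
--                         out[r][c] = 8
--                         break
--     return out
-- ===== SOURCE B (Python) =====
-- def solve_10fcaaa3(grid):
--     h, w = len(grid), len(grid[0])
--     oh, ow = 2 * h, 2 * w
--     tiled = [[grid[r % h][c % w] for c in range(ow)] for r in range(oh)]
--     # Pass 1: horizontal dilation of the nonzero mask.
--     # hd[r][c] is True iff row r has a nonzero entry at column c-1 or c+1.
--     hd = [[(c > 0 and row[c - 1] != 0) or (c + 1 < ow and row[c + 1] != 0)
--            for c in range(ow)] for row in tiled]
--     # Pass 2: a zero cell has a nonzero diagonal neighbour iff the
--     # horizontally-dilated mask holds in the row above or below.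
--     return [[8 if tiled[r][c] == 0 and ((r > 0 and hd[r - 1][c])
--                                         or (r + 1 < oh and hd[r + 1][c]))
--              else tiled[r][c]
--              for c in range(ow)] for r in range(oh)]
-- ===== Notes on version B (the rewrite author's own statement) =====
-- stated objective: alternative
-- what changed: A mutates a copy of the tiled grid, scanning each zero cell's four diagonal offsets with a break; B is a separable morphological dilation in two staged passes: it first precomputes a horizontal dilation mask hd of the nonzero cells (left/right neighbours only), then builds the output purely by combining the mask rows above and below, so the four-offset neighbour loop and the in-place mutation disappear.
import Mathlib
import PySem

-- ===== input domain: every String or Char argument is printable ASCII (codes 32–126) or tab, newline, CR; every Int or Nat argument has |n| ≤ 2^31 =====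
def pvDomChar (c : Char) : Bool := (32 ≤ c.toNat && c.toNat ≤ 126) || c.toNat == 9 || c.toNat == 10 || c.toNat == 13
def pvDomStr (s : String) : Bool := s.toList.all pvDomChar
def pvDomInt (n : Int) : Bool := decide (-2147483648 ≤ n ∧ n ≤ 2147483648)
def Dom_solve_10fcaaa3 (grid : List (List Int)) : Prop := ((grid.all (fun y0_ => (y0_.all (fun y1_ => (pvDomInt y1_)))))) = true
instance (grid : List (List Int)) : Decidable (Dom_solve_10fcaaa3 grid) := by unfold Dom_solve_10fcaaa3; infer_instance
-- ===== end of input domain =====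

-- B replaces A's per-zero-cell four-offset diagonal scan with a break and in-place
-- mutation by a staged separable dilation: a precomputed horizontal dilation mask,
-- then a pure vertical combine (objective: alternative).

-- ===== PORT A =====
-- A's tiled cell grid[r % h][c % w]
def pvTileCell (grid : List (List Int)) (h w r c : Int) : Int :=
  PySem.List.pyGetD (PySem.List.pyGetD grid (PySem.Int.mod r h) []) (PySem.Int.mod c w) 0

def solve_10fcaaa3 (grid : List (List Int)) : List (List Int) :=
  let h : Int := grid.length
  let w : Int := (PySem.List.pyGetD grid 0 []).length
  let oh : Int := h * 2
  let ow : Int := w * 2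
  let tiled : List (List Int) :=
    (PySem.List.pyRange 0 oh 1).map (fun r =>
      (PySem.List.pyRange 0 ow 1).map (fun c => pvTileCell grid h w r c))
  let out : List (List Int) := tiled.map (fun row => row)  -- row[:]
  (PySem.List.pyRange 0 oh 1).foldl (fun out r =>
    (PySem.List.pyRange 0 ow 1).foldl (fun out c =>
      if PySem.List.pyGetD (PySem.List.pyGetD tiled r []) c 0 == 0 then
        -- the break writes out[r][c] = 8 on the first hit; net effect: one write iff any dir hits
        if [((-1:Int),(-1:Int)),(-1,1),(1,-1),(1,1)].any (fun p =>
              decide (0 ≤ r + p.1) && decide (r + p.1 < oh) &&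
              decide (0 ≤ c + p.2) && decide (c + p.2 < ow) &&
              (PySem.List.pyGetD (PySem.List.pyGetD tiled (r + p.1) []) (c + p.2) 0 != 0))
        then PySem.List.pySetD out r (PySem.List.pySetD (PySem.List.pyGetD out r []) c 8)
        else out
      else out) out) out

-- ===== PORT B =====
-- Source B's tiled cell grid[r % h][c % w]
def pvAltTile (grid : List (List Int)) (h w r c : Int) : Int :=
  PySem.List.pyGetD (PySem.List.pyGetD grid (PySem.Int.mod r h) []) (PySem.Int.mod c w) 0

def solve_10fcaaa3_alt (grid : List (List Int)) : List (List Int) :=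
  let h : Int := grid.length
  let w : Int := (PySem.List.pyGetD grid 0 []).length
  let oh : Int := h * 2
  let ow : Int := w * 2
  let tiled : List (List Int) :=
    (PySem.List.pyRange 0 oh 1).map (fun r =>
      (PySem.List.pyRange 0 ow 1).map (fun c => pvAltTile grid h w r c))
  -- pass 1: horizontal dilation mask of the nonzero cells
  let hd : List (List Bool) :=
    tiled.map (fun row =>
      (PySem.List.pyRange 0 ow 1).map (fun c =>
        (decide (0 < c) && (PySem.List.pyGetD row (c - 1) 0 != 0)) ||
        (decide (c + 1 < ow) && (PySem.List.pyGetD row (c + 1) 0 != 0))))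
  -- pass 2: combine the mask rows above and below
  (PySem.List.pyRange 0 oh 1).map (fun r =>
    (PySem.List.pyRange 0 ow 1).map (fun c =>
      if (PySem.List.pyGetD (PySem.List.pyGetD tiled r []) c 0 == 0) &&
         ((decide (0 < r) &&
            PySem.List.pyGetD (PySem.List.pyGetD hd (r - 1) []) c false) ||
          (decide (r + 1 < oh) &&
            PySem.List.pyGetD (PySem.List.pyGetD hd (r + 1) []) c false))
      then (8 : Int)
      else PySem.List.pyGetD (PySem.List.pyGetD tiled r []) c 0))

-- ===== PRECONDITION & SPEC =====
-- Pre_ excludes exactly the inputs where Python A raises IndexError: the empty grid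
-- (grid[0]) and grids with a row shorter than len(grid[0]) (grid[r % h][c % w]).
def Pre_solve_10fcaaa3 (grid : List (List Int)) : Prop :=
  grid ≠ [] ∧ ∀ row ∈ grid, (grid.headD []).length ≤ row.length
instance (grid : List (List Int)) : Decidable (Pre_solve_10fcaaa3 grid) := by
  unfold Pre_solve_10fcaaa3; infer_instance

def pvWitness_solve_10fcaaa3 : List (List Int) := [[0, 1], [2, 0]]

def Spec_solve_10fcaaa3 (grid : List (List Int)) (out : List (List Int)) : Prop := out = solve_10fcaaa3_alt grid
instance (grid : List (List Int)) (out : List (List Int)) : Decidable (Spec_solve_10fcaaa3 grid out) := by unfold Spec_solve_10fcaaa3; infer_instance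

-- ===== CLAIM (what is proved, stated in full; the proofs are below) =====
def Claim_equal_solve_10fcaaa3 : Prop := ∀ (grid : List (List Int)), Dom_solve_10fcaaa3 grid → Pre_solve_10fcaaa3 grid → Spec_solve_10fcaaa3 grid (solve_10fcaaa3 grid)

-- ===== LEMMAS AND PROOFS =====

def pvRowFold (Q : Int → Bool) (C : List Int) (row : List Int) : List Int :=
  C.foldl (fun rw c => if Q c then PySem.List.pySetD rw c 8 else rw) row

theorem pvRowFold_getElem? (Q : Int → Bool) (C : List Int) (row : List Int)
    (hC : ∀ c ∈ C, 0 ≤ c) (j : Nat) :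
    (pvRowFold Q C row)[j]? =
      if ((j : Int) ∈ C ∧ Q (j : Int) ∧ j < row.length) then some 8 else row[j]? := by
  induction C generalizing row with
  | nil => simp [pvRowFold]
  | cons c C ih =>
      have hc0 : 0 ≤ c := hC c (List.mem_cons_self ..)
      have hC' : ∀ c ∈ C, 0 ≤ c := fun x hx => hC x (List.mem_cons_of_mem _ hx)
      simp only [pvRowFold, List.foldl_cons] at *
      by_cases hq : Q c
      · rw [if_pos hq, PySem.List.pySetD_of_nonneg _ _ hc0, ih _ hC']
        by_cases hcj : c.toNat = j
        · have hcj' : c = (j : Int) := by omega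
          subst hcj'
          simp only [List.length_set, List.getElem?_set, hcj, List.mem_cons]
          by_cases hlt : j < row.length
          · simp [hlt, hq]
          · simp [hlt, hq]
        · have hcj' : c ≠ (j : Int) := by omega
          simp only [List.length_set, List.getElem?_set, hcj, List.mem_cons]
          simp [Ne.symm hcj']
      · rw [if_neg hq, ih _ hC']
        by_cases hcj : c = (j : Int)
        · subst hcj
          simp [hq]
        · simp [List.mem_cons, Ne.symm hcj]

theorem pv_pyGetD_pySetD_self (g : List (List Int)) (r : Int) (X : List Int)
    (hr : 0 ≤ r) (hlt : r.toNat < g.length) :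
    PySem.List.pyGetD (PySem.List.pySetD g r X) r [] = X := by
  rw [PySem.List.pySetD_of_nonneg _ _ hr, PySem.List.pyGetD_of_nonneg _ _ hr,
    List.getD_eq_getElem _ _ (by simpa using hlt), List.getElem_set_self]

theorem pv_pySetD_pySetD_self (g : List (List Int)) (r : Int) (X Y : List Int) (hr : 0 ≤ r) :
    PySem.List.pySetD (PySem.List.pySetD g r X) r Y = PySem.List.pySetD g r Y := by
  rw [PySem.List.pySetD_of_nonneg _ _ hr, PySem.List.pySetD_of_nonneg _ _ hr,
    PySem.List.pySetD_of_nonneg _ _ hr, List.set_set]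

theorem pvInner_eq (Q : Int → Bool) (C : List Int) (g : List (List Int)) (r : Int)
    (hr : 0 ≤ r) (hlt : r.toNat < g.length) :
    C.foldl (fun out c =>
        if Q c then
          PySem.List.pySetD out r (PySem.List.pySetD (PySem.List.pyGetD out r []) c 8)
        else out) g
    = PySem.List.pySetD g r (pvRowFold Q C (PySem.List.pyGetD g r [])) := by
  induction C generalizing g with
  | nil =>
      simp only [List.foldl_nil, pvRowFold]
      rw [PySem.List.pySetD_of_nonneg _ _ hr, PySem.List.pyGetD_of_nonneg _ _ hr,
        List.getD_eq_getElem _ _ hlt, List.set_getElem_self]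
  | cons c C ih =>
      simp only [List.foldl_cons]
      by_cases hq : Q c
      · rw [if_pos hq]
        rw [ih _ (by simp [PySem.List.pySetD_of_nonneg _ _ hr, hlt])]
        rw [pv_pyGetD_pySetD_self _ _ _ hr hlt, pv_pySetD_pySetD_self _ _ _ _ hr]
        simp only [pvRowFold, List.foldl_cons, if_pos hq]
      · rw [if_neg hq, ih _ hlt]
        simp only [pvRowFold, List.foldl_cons, if_neg hq]

theorem pvOuter_getElem? (P : Int → Int → Bool) (R C : List Int) (g : List (List Int))
    (hR : R.Nodup) (hmem : ∀ r ∈ R, 0 ≤ r ∧ r.toNat < g.length) (i : Nat) :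
    (R.foldl (fun out r => C.foldl (fun out c =>
        if P r c then
          PySem.List.pySetD out r (PySem.List.pySetD (PySem.List.pyGetD out r []) c 8)
        else out) out) g)[i]?
    = if (i : Int) ∈ R then (g[i]?).map (fun row => pvRowFold (P (i : Int)) C row)
      else g[i]? := by
  induction R generalizing g with
  | nil => simp
  | cons r R ih =>
      obtain ⟨hr0, hlt⟩ := hmem r (List.mem_cons_self ..)
      have hmem' : ∀ x ∈ R, 0 ≤ x ∧ x.toNat < g.length :=
        fun x hx => hmem x (List.mem_cons_of_mem _ hx)
      simp only [List.foldl_cons]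
      rw [pvInner_eq (P r) C g r hr0 hlt]
      have hlen : (PySem.List.pySetD g r (pvRowFold (P r) C (PySem.List.pyGetD g r []))).length
          = g.length := PySem.List.length_pySetD ..
      rw [ih _ hR.of_cons (fun x hx => by rw [hlen]; exact hmem' x hx)]
      rw [PySem.List.pySetD_of_nonneg _ _ hr0]
      by_cases hiR : (i : Int) ∈ R
      · have hne : r.toNat ≠ i := by
          intro h
          have : r = (i : Int) := by omega
          exact (List.nodup_cons.mp hR).1 (this ▸ hiR)
        rw [List.getElem?_set_ne hne]
        simp [hiR, List.mem_cons]
      · by_cases hir : (i : Int) = r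
        · have hni : r.toNat = i := by omega
          subst hni
          rw [List.getElem?_set_self (by simpa using hlt)]
          rw [if_neg hiR, if_pos (List.mem_cons.mpr (Or.inl hir))]
          rw [List.getElem?_eq_getElem hlt, PySem.List.pyGetD_of_nonneg _ _ hr0,
            List.getD_eq_getElem _ _ hlt]
          simp [hir]
        · have hne : r.toNat ≠ i := by omega
          rw [List.getElem?_set_ne hne, if_neg hiR,
            if_neg (by simp [List.mem_cons, hir, hiR])]

theorem pv_if_and (A B : Int → Int → Bool) (R C : List Int) (g : List (List Int)) :
    R.foldl (fun out r => C.foldl (fun out c =>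
      if A r c then
        (if B r c then
          PySem.List.pySetD out r (PySem.List.pySetD (PySem.List.pyGetD out r []) c 8)
        else out)
      else out) out) g
  = R.foldl (fun out r => C.foldl (fun out c =>
      if A r c && B r c then
        PySem.List.pySetD out r (PySem.List.pySetD (PySem.List.pyGetD out r []) c 8)
      else out) out) g := by
  apply PySem.List.foldl_congr_mem
  intro acc r _
  apply PySem.List.foldl_congr_mem
  intro acc2 c _
  by_cases hA : A r c <;> by_cases hB : B r c <;> simp [hA, hB]

theorem pvBoolEq (a b c d x1 x2 x3 x4 : Bool) :
    ((a && c && x1) || ((a && d && x2) || ((b && c && x3) || (b && d && x4))))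
    = ((a && ((c && x1) || (d && x2))) || (b && ((c && x3) || (d && x4)))) := by
  cases a <;> cases b <;> cases c <;> cases d <;>
    cases x1 <;> cases x2 <;> cases x3 <;> cases x4 <;> rfl

theorem pv_cell_if (t : Int) (M : Bool) (mem len : Prop)
    [Decidable mem] [Decidable len] (hmem : mem) (hlen : len) :
    (if (mem ∧ ((t == 0) && M) = true ∧ len) then (some 8 : Option Int) else some t)
    = some (if (t == 0) && M then 8 else t) := by
  by_cases h : ((t == 0) && M) = true <;> simp [h, hmem, hlen]

theorem pv_main (grid : List (List Int)) : solve_10fcaaa3 grid = solve_10fcaaa3_alt grid := by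
  simp only [solve_10fcaaa3, solve_10fcaaa3_alt, List.map_id']
  set h : Int := (grid.length : Int) with hh
  set w : Int := ((PySem.List.pyGetD grid 0 []).length : Int) with hwdef
  have hTT : pvAltTile = pvTileCell := rfl
  rw [hTT]
  set tiled : List (List Int) :=
    (PySem.List.pyRange 0 (h * 2) 1).map (fun r =>
      (PySem.List.pyRange 0 (w * 2) 1).map (fun c => pvTileCell grid h w r c)) with htiled
  set hd : List (List Bool) :=
    tiled.map (fun row =>
      (PySem.List.pyRange 0 (w * 2) 1).map (fun c =>
        (decide (0 < c) && (PySem.List.pyGetD row (c - 1) 0 != 0)) ||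
        (decide (c + 1 < w * 2) && (PySem.List.pyGetD row (c + 1) 0 != 0)))) with hhd
  have h0 : (0:Int) ≤ h := by rw [hh]; exact Int.natCast_nonneg _
  have hw0 : (0:Int) ≤ w := by rw [hwdef]; exact Int.natCast_nonneg _
  have hlen_tiled : tiled.length = (h*2 - 0).toNat := by
    rw [htiled]; rw [List.length_map, PySem.List.length_pyRange_one]
  have hcell : ∀ r c : Int, 0 ≤ r → r < h*2 → 0 ≤ c → c < w*2 →
      PySem.List.pyGetD (PySem.List.pyGetD tiled r []) c 0 = pvTileCell grid h w r c := by
    intro r c hr1 hr2 hc1 hc2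
    rw [htiled, PySem.List.pyGetD_map_pyRange_of_nonneg _ _ _ _ hr1 hr2,
      PySem.List.pyGetD_map_pyRange_of_nonneg _ _ _ _ hc1 hc2]
  have hmask : ∀ k c : Int, 0 ≤ k → k < h*2 → 0 ≤ c → c < w*2 →
      PySem.List.pyGetD (PySem.List.pyGetD hd k []) c false
      = ((decide (0 < c) &&
            (PySem.List.pyGetD (PySem.List.pyGetD tiled k []) (c - 1) 0 != 0)) ||
         (decide (c + 1 < w*2) &&
            (PySem.List.pyGetD (PySem.List.pyGetD tiled k []) (c + 1) 0 != 0))) := by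
    intro k c hk1 hk2 hc1 hc2
    have hdmap : hd = (PySem.List.pyRange 0 (h * 2) 1).map (fun r =>
        (PySem.List.pyRange 0 (w * 2) 1).map (fun c =>
          (decide (0 < c) &&
            (PySem.List.pyGetD ((PySem.List.pyRange 0 (w * 2) 1).map
                (fun c => pvTileCell grid h w r c)) (c - 1) 0 != 0)) ||
          (decide (c + 1 < w * 2) &&
            (PySem.List.pyGetD ((PySem.List.pyRange 0 (w * 2) 1).map
                (fun c => pvTileCell grid h w r c)) (c + 1) 0 != 0)))) := by
      rw [hhd, htiled, List.map_map]; rfl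
    rw [hdmap, PySem.List.pyGetD_map_pyRange_of_nonneg _ _ _ _ hk1 hk2,
      PySem.List.pyGetD_map_pyRange_of_nonneg _ _ _ _ hc1 hc2,
      htiled, PySem.List.pyGetD_map_pyRange_of_nonneg _ _ _ _ hk1 hk2]
  rw [pv_if_and]
  apply List.ext_getElem?
  intro i
  rw [pvOuter_getElem? _ _ _ _ (PySem.List.nodup_pyRange_one _ _)
    (fun r hr => ⟨(PySem.List.mem_pyRange_one.mp hr).1, by
      have := PySem.List.mem_pyRange_one.mp hr
      rw [hlen_tiled]; omega⟩) i]
  rw [List.getElem?_map, PySem.List.getElem?_pyRange_one]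
  by_cases hi : i < (h*2 - 0).toNat
  · have himem : (i : Int) ∈ PySem.List.pyRange 0 (h*2) 1 :=
      PySem.List.mem_pyRange_one.mpr ⟨Int.natCast_nonneg _, by omega⟩
    rw [if_pos himem, if_pos hi]
    rw [htiled, List.getElem?_map, PySem.List.getElem?_pyRange_one, if_pos hi]
    simp only [Option.map_some, zero_add]
    rw [← htiled]
    have hiI1 : (0:Int) ≤ (i:Int) := Int.natCast_nonneg _
    have hiI2 : ((i:Int)) < h*2 := by omega
    congr 1
    apply List.ext_getElem?
    intro j
    rw [pvRowFold_getElem? _ _ _ (fun c hc => (PySem.List.mem_pyRange_one.mp hc).1) j]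
    simp only [List.getElem?_map, PySem.List.getElem?_pyRange_one, List.length_map,
      PySem.List.length_pyRange_one]
    by_cases hj : j < ((w*2:Int) - 0).toNat
    · have hj1 : (0:Int) ≤ (j:Int) := Int.natCast_nonneg _
      have hj2 : ((j:Int)) < w*2 := by omega
      have hjmem : (j : Int) ∈ PySem.List.pyRange 0 (w*2) 1 :=
        PySem.List.mem_pyRange_one.mpr ⟨hj1, hj2⟩
      rw [if_pos hj]
      simp only [zero_add]
      -- A's 4-offset any equals B's two-row combine of the horizontal mask
      have e1 : decide ((0:Int) ≤ (i:Int) + -1) = decide ((0:Int) < (i:Int)) :=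
        decide_eq_decide.mpr (by omega)
      have e2 : decide ((i:Int) + -1 < h*2) = true := decide_eq_true (by omega)
      have e3 : decide ((0:Int) ≤ (j:Int) + -1) = decide ((0:Int) < (j:Int)) :=
        decide_eq_decide.mpr (by omega)
      have e4 : decide ((j:Int) + -1 < w*2) = true := decide_eq_true (by omega)
      have e5 : decide ((0:Int) ≤ (i:Int) + 1) = true := decide_eq_true (by omega)
      have e6 : decide ((0:Int) ≤ (j:Int) + 1) = true := decide_eq_true (by omega)
      have hANY :
          ([((-1:Int),(-1:Int)),(-1,1),(1,-1),(1,1)].any (fun p =>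
              decide (0 ≤ (i:Int) + p.1) && decide ((i:Int) + p.1 < h*2) &&
              decide (0 ≤ (j:Int) + p.2) && decide ((j:Int) + p.2 < w*2) &&
              (PySem.List.pyGetD (PySem.List.pyGetD tiled ((i:Int) + p.1) [])
                ((j:Int) + p.2) 0 != 0)))
          = ((decide (0 < (i:Int)) &&
                PySem.List.pyGetD (PySem.List.pyGetD hd ((i:Int) - 1) []) (j:Int) false) ||
             (decide ((i:Int) + 1 < h*2) &&
                PySem.List.pyGetD (PySem.List.pyGetD hd ((i:Int) + 1) []) (j:Int) false)) := by
        simp only [List.any_cons, List.any_nil, Bool.or_false, e1, e2, e3, e4, e5, e6,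
          Bool.and_true, Bool.true_and]
        by_cases hup : (0:Int) < (i:Int)
        · by_cases hdn : (i:Int) + 1 < h*2
          · rw [hmask _ _ (by omega) (by omega) hj1 hj2,
              hmask _ _ (by omega) (by omega) hj1 hj2]
            have eA : (i:Int) - 1 = (i:Int) + -1 := by ring
            have eB : (j:Int) - 1 = (j:Int) + -1 := by ring
            rw [eA, eB]
            exact pvBoolEq _ _ _ _ _ _ _ _
          · simp only [decide_eq_false hdn, Bool.false_and, Bool.or_false]
            rw [hmask _ _ (by omega) (by omega) hj1 hj2]
            have eA : (i:Int) - 1 = (i:Int) + -1 := by ring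
            have eB : (j:Int) - 1 = (j:Int) + -1 := by ring
            rw [eA, eB]
            simp [Bool.and_or_distrib_left, Bool.and_assoc]
        · have hnot : decide ((0:Int) < (i:Int)) = false := decide_eq_false hup
          simp only [hnot, Bool.false_and, Bool.false_or]
          by_cases hdn : (i:Int) + 1 < h*2
          · rw [hmask _ _ (by omega) (by omega) hj1 hj2]
            have eB : (j:Int) - 1 = (j:Int) + -1 := by ring
            rw [eB]
            simp [Bool.and_or_distrib_left, Bool.and_assoc]
          · simp [decide_eq_false hdn]
      rw [hANY]
      simp only [Option.map_some]
      rw [hcell _ _ hiI1 hiI2 hj1 hj2]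
      exact pv_cell_if _ _ _ _ hjmem hj
    · rw [if_neg hj]
      rw [if_neg (fun hcon => hj hcon.2.2)]
      rfl
  · have hnmem : ¬ (i : Int) ∈ PySem.List.pyRange 0 (h*2) 1 := by
      rw [PySem.List.mem_pyRange_one]; omega
    rw [if_neg hnmem, if_neg hi]
    simp only [List.getElem?_map, PySem.List.getElem?_pyRange_one, if_neg hi,
      Option.map_none]

-- ===== VERDICT (by name: the statement is the Claim_ definition above) =====
theorem solve_10fcaaa3_spec : Claim_equal_solve_10fcaaa3 := by
  intro grid _ _
  unfold Spec_solve_10fcaaa3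
  exact pv_main grid
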